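-- pv_equiv track=rewrite | github.com/Shiloren/Kezan-Protocol | kezan/ai_framework/api_controller.py | _get_price_range
-- ===== SOURCE A (Python) =====
-- def _get_price_range(price: int) -> str:
--     """Categoriza un precio en un rango para comparación de estrategias."""
--     ranges = [
--         (0, 100, 'very_low'),
--         (100, 1000, 'low'),
--         (1000, 10000, 'medium'),
--         (10000, 100000, 'high'),
--         (100000, float('inf'), 'very_high')
--     ]
--
--     for min_price, max_price, category in ranges:
--         if min_price <= price < max_price:
--             return category
--
--     return 'unknown'
-- ===== SOURCE B (Python) =====
-- def _bisect_right(a, x):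
--     lo, hi = 0, len(a)
--     while lo < hi:
--         mid = (lo + hi) // 2
--         if x < a[mid]:
--             hi = mid
--         else:
--             lo = mid + 1
--     return lo
--
-- _THRESHOLDS = [100, 1000, 10000, 100000]
-- _LABELS = ['very_low', 'low', 'medium', 'high', 'very_high']
--
-- def _get_price_range(price: int) -> str:
--     if price < 0:
--         return 'unknown'
--     return _LABELS[_bisect_right(_THRESHOLDS, price)]
-- ===== Notes on version B (the rewrite author's own statement) =====
-- stated objective: alternative
-- what changed: Replaces the linear scan over (min,max,label) range tuples with a negativity guard plus a binary search (bisect_right) into a sorted threshold list indexing a label table.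
import Mathlib
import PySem

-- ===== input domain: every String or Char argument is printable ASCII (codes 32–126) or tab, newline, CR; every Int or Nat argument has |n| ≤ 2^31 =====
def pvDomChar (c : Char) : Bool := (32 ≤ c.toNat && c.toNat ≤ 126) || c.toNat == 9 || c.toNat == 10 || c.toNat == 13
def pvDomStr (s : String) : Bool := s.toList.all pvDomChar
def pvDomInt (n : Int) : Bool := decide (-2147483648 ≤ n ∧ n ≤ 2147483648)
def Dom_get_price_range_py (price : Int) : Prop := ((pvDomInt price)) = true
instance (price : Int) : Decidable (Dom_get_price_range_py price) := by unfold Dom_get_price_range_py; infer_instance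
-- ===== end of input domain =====

-- B replaces A's linear scan over range tuples with a guard plus a binary search into a threshold/label table (alternative decomposition, same exact values).

-- ===== PORT A =====
-- the upper bound is Option Int: none models Python's float('inf') (always satisfied by an int price)
def pvRangeLoop (price : Int) : List (Int × Option Int × String) → String
  | [] => "unknown"
  | (mn, mx, cat) :: rest =>
      if mn ≤ price ∧ (match mx with | none => true | some m => decide (price < m)) = true then cat
      else pvRangeLoop price rest

def get_price_range_py (price : Int) : String :=
  pvRangeLoop price
    [(0, some 100, "very_low"), (100, some 1000, "low"), (1000, some 10000, "medium"),
     (10000, some 100000, "high"), (100000, none, "very_high")]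

-- ===== PORT B =====
-- hand-written bisect_right from Source B; a.getD mid 0 is exact: mid is always in range here
def pvBisectRight (a : List Int) (x : Int) (lo hi : Nat) : Nat :=
  if h : lo < hi then
    let mid := (lo + hi) / 2
    if x < a.getD mid 0 then pvBisectRight a x lo mid
    else pvBisectRight a x (mid + 1) hi
  else lo
termination_by hi - lo
decreasing_by all_goals omega

def get_price_range_py_alt (price : Int) : String :=
  let thresholds : List Int := [100, 1000, 10000, 100000]
  let labels : List String := ["very_low", "low", "medium", "high", "very_high"]
  if price < 0 then "unknown"
  else labels.getD (pvBisectRight thresholds price 0 thresholds.length) "unknown"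

-- ===== PRECONDITION & SPEC =====
def Spec_get_price_range_py (price : Int) (out : String) : Prop := out = get_price_range_py_alt price
instance (price : Int) (out : String) : Decidable (Spec_get_price_range_py price out) := by unfold Spec_get_price_range_py; infer_instance

-- ===== CLAIM (what is proved, stated in full; the proofs are below) =====
def Claim_equal_get_price_range_py : Prop := ∀ (price : Int), Dom_get_price_range_py price → Spec_get_price_range_py price (get_price_range_py price)

-- ===== LEMMAS AND PROOFS =====
theorem pvBisect_eval (price : Int) :
    pvBisectRight [100, 1000, 10000, 100000] price 0 4 =
      (if price < 100 then 0 else if price < 1000 then 1 else if price < 10000 then 2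
       else if price < 100000 then 3 else 4) := by
  rw [pvBisectRight]; norm_num
  split_ifs <;>
    simp_all [pvBisectRight] <;> omega

-- ===== VERDICT (by name: the statement is the Claim_ definition above) =====
theorem get_price_range_py_spec : Claim_equal_get_price_range_py := by
  intro price _
  unfold Spec_get_price_range_py get_price_range_py get_price_range_py_alt
  simp only [pvRangeLoop]
  norm_num [pvBisect_eval]
  split_ifs <;> simp_all <;> omega
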